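-- pv_equiv track=rewrite | github.com/DAEUN9/TIL | Soving/programmers/level3/숫자 게임.py | solution
-- ===== SOURCE A (Python) =====
-- def solution(A, B):
--     answer = 0
--     A.sort(reverse=True)
--     B.sort()
--     for a in A:
--         if B[-1] > a:
--             B.pop()
--             answer += 1
--         else:
--             B.pop(0)
--     return answer
-- ===== SOURCE B (Python) =====
-- def solution(A, B):
--     # Opposite-side greedy: walk B's values in ASCENDING order and advance an
--     # index over sorted A, counting each b that beats the smallest still-unbeaten a.
--     # Return value only: unlike A, this does not sort A and B in place.
--     asc_a = sorted(A)
--     i = 0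
--     for b in sorted(B):
--         if i < len(asc_a) and b > asc_a[i]:
--             i += 1
--     return i
-- ===== Notes on version B (the rewrite author's own statement) =====
-- stated objective: alternative
-- what changed: Replaces A's loop over A descending that destructively pops from both ends of B with the opposite-side greedy: one ascending scan over sorted(B) advancing a single index into sorted(A), counting each b that beats the smallest still-unbeaten a.
import Mathlib
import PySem

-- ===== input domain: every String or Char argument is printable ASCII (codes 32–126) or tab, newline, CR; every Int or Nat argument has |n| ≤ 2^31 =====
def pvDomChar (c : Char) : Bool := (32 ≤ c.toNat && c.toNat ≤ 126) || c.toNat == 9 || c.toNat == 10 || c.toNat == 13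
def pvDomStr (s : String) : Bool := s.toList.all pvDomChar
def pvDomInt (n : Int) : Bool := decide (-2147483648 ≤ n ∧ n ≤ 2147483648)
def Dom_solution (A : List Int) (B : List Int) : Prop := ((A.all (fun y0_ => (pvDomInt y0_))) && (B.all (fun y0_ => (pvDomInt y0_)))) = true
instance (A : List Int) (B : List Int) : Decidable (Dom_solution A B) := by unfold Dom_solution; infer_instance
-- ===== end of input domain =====

-- B replaces A's loop over A descending that destructively pops from both ends of B with the
-- opposite-side greedy: walk sorted(B) ascending and advance one index over sorted(A);
-- equivalence is about the RETURN value only (A sorts its arguments in place, B does not).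


-- ===== PORT A =====
-- for a in A (sorted descending): if B[-1] > a: B.pop(); answer += 1 else: B.pop(0)
-- B.pop() = dropLast, B.pop(0) = tail (exact on nonempty lists; empty B is an
-- IndexError at B[-1], i.e. getLast? = none, and is excluded by Pre_solution).
def solutionLoop : List Int → List Int → Int → Int
  | [], _, answer => answer
  | a :: rest, L, answer =>
    match L.getLast? with
    | none => answer  -- Python raises IndexError here; outside Pre_solution
    | some b =>
      if b > a then solutionLoop rest L.dropLast (answer + 1)
      else solutionLoop rest L.tail answer

def solution (A : List Int) (B : List Int) : Int :=
  solutionLoop (PySem.List.sorted A (fun x => x) true) (PySem.List.sorted B (fun x => x) false) 0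

-- ===== PORT B =====
-- asc_a = sorted(A); i = 0
-- for b in sorted(B): if i < len(asc_a) and b > asc_a[i]: i += 1
def solutionAltLoop : List Int → List Int → Int → Int
  | [], _, i => i
  | b :: rest, asc, i =>
    if i < (asc.length : Int) then
      match PySem.List.pyGet? asc i with
      | some a => if b > a then solutionAltLoop rest asc (i + 1) else solutionAltLoop rest asc i
      | none => solutionAltLoop rest asc i  -- unreachable: 0 ≤ i < len(asc)
    else solutionAltLoop rest asc i

def solution_alt (A : List Int) (B : List Int) : Int :=
  solutionAltLoop (PySem.List.sorted B (fun x => x) false) (PySem.List.sorted A (fun x => x) false) 0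

-- ===== PRECONDITION & SPEC =====
-- A pops one element of B per element of A and reads B[-1] first, so it raises
-- IndexError exactly when len(A) > len(B).
def Pre_solution (A : List Int) (B : List Int) : Prop := A.length ≤ B.length
instance (A : List Int) (B : List Int) : Decidable (Pre_solution A B) := by unfold Pre_solution; infer_instance

def pvWitness_solution : List Int × List Int := ([5, 1, 3], [2, 6, 4])

def Spec_solution (A : List Int) (B : List Int) (out : Int) : Prop := out = solution_alt A B
instance (A : List Int) (B : List Int) (out : Int) : Decidable (Spec_solution A B out) := by unfold Spec_solution; infer_instance

-- ===== CLAIM (what is proved, stated in full; the proofs are below) =====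
def Claim_equal_solution : Prop := ∀ (A : List Int) (B : List Int), Dom_solution A B → Pre_solution A B → Spec_solution A B (solution A B)

-- ===== LEMMAS AND PROOFS =====

-- P: A's loop on abstracted state — as descending, bs descending (head = current max of B);
-- a skipped minimum of B is simply never removed (P_congr shows it is never read either).
def Pgreedy : List Int → List Int → Int
  | [], _ => 0
  | _ :: _, [] => 0
  | a :: as, b :: bs => if b > a then 1 + Pgreedy as bs else Pgreedy as (b :: bs)

-- S: B's loop in structural form — bs ascending, as ascending.
def Sgreedy : List Int → List Int → Int
  | [], _ => 0
  | _ :: _, [] => 0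
  | b :: bs, a :: as => if b > a then 1 + Sgreedy bs as else Sgreedy bs (a :: as)

lemma Pgreedy_nil_right (as : List Int) : Pgreedy as [] = 0 := by
  cases as <;> rfl

lemma Sgreedy_nil_right (bs : List Int) : Sgreedy bs [] = 0 := by
  cases bs <;> rfl

-- Pgreedy only ever reads the first |as| elements of bs.
lemma Pgreedy_congr (as : List Int) : ∀ (Y Z : List Int),
    Y.take as.length = Z.take as.length → Pgreedy as Y = Pgreedy as Z := by
  induction as with
  | nil => intro Y Z _; rfl
  | cons a rest ih =>
    intro Y Z h
    cases Y with
    | nil =>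
      have : Z = [] := by
        simpa [List.take_succ_cons, List.eq_nil_iff_forall_not_mem] using
          (List.take_eq_nil_iff.mp h.symm)
      subst this; rfl
    | cons y Y' =>
      cases Z with
      | nil => simp [List.length_cons, List.take_succ_cons] at h
      | cons z Z' =>
        simp only [List.length_cons, List.take_succ_cons, List.cons.injEq] at h
        obtain ⟨rfl, htail⟩ := h
        simp only [Pgreedy]
        by_cases hy : y > a
        · simp only [if_pos hy]; rw [ih Y' Z' htail]
        · simp only [if_neg hy]
          apply ih
          cases hr : rest.length with
          | zero => simp
          | succ m =>
            simp only [List.take_succ_cons]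
            congr 1
            have := congrArg (fun l => l.take m) htail
            simpa [List.take_take, hr, Nat.min_def] using this

lemma tail_reverse_eq (l : List Int) : l.tail.reverse = l.reverse.dropLast := by
  induction l with
  | nil => rfl
  | cons a t ih => simp

-- A's loop equals Pgreedy on the reversed (descending) B-state.
lemma loopA_eq_P (as : List Int) : ∀ (L : List Int) (ans : Int),
    as.length ≤ L.length → solutionLoop as L ans = ans + Pgreedy as L.reverse := by
  induction as with
  | nil => intro L ans _; simp only [solutionLoop, Pgreedy]; ring
  | cons a rest ih =>
    intro L ans hlen
    have hLne : L ≠ [] := by intro h; subst h; simp at hlen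
    obtain ⟨b, t, hrev⟩ : ∃ b t, L.reverse = b :: t := by
      cases hR : L.reverse with
      | nil => exact absurd (List.reverse_eq_nil_iff.mp hR) hLne
      | cons b t => exact ⟨b, t, rfl⟩
    have hlast : L.getLast? = some b := by
      rw [← List.head?_reverse, hrev]; rfl
    have hlenL : 0 < L.length := List.length_pos_iff.mpr hLne
    simp only [solutionLoop, hlast]
    by_cases hb : b > a
    · simp only [if_pos hb]
      rw [ih L.dropLast (ans + 1) (by simp [List.length_dropLast]; simp at hlen; omega)]
      have hdl : L.dropLast.reverse = t := by
        have h1 := tail_reverse_eq L.reverse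
        rw [List.reverse_reverse] at h1
        rw [← h1, List.reverse_reverse, hrev]; rfl
      rw [hdl, hrev]
      simp [Pgreedy, if_pos hb]; ring
    · simp only [if_neg hb]
      rw [ih L.tail ans (by simp [List.length_tail]; simp at hlen; omega)]
      rw [tail_reverse_eq, hrev]
      have hcongr : Pgreedy rest (b :: t).dropLast = Pgreedy rest (b :: t) := by
        apply Pgreedy_congr
        rw [List.dropLast_eq_take, List.take_take]
        congr 1
        have : rest.length ≤ t.length := by
          have : (b :: t).length = L.length := by rw [← hrev]; simp
          simp at this hlen ⊢; omega
        simp [Nat.min_def]; omega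
      rw [hcongr]
      simp [Pgreedy, if_neg hb]

-- Matching the overall maximum of B with the overall minimum of A (when it wins)
-- contributes exactly one pair, whatever A's loop does in between.
lemma Pgreedy_append_match (a b : Int) (as : List Int) : ∀ (bs : List Int),
    b > a → (∀ x ∈ as, a ≤ x) → (∀ y ∈ bs, b ≤ y) →
    Pgreedy (as ++ [a]) (bs ++ [b]) = 1 + Pgreedy as bs := by
  induction as with
  | nil =>
    intro bs hba _ hbs
    cases bs with
    | nil => simp [Pgreedy, hba]
    | cons c bs' =>
      have : c > a := lt_of_lt_of_le hba (hbs c (by simp))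
      simp [Pgreedy, this]
  | cons a' as' ih =>
    intro bs hba has hbs
    have ha' : a ≤ a' := has a' (by simp)
    cases bs with
    | nil =>
      by_cases hb' : b > a'
      · simp [Pgreedy, hb', Pgreedy_nil_right]
      · simp only [List.nil_append, List.cons_append, Pgreedy, if_neg hb']
        have := ih [] hba (fun x hx => has x (by simp [hx])) (by simp)
        simpa [Pgreedy_nil_right] using this
    | cons c bs' =>
      have hcb : b ≤ c := hbs c (by simp)
      by_cases hc : c > a'
      · simp only [List.cons_append, Pgreedy, if_pos hc]
        rw [ih bs' hba (fun x hx => has x (by simp [hx])) (fun y hy => hbs y (by simp [hy]))]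
      · simp only [List.cons_append, Pgreedy, if_neg hc]
        exact ih (c :: bs') hba (fun x hx => has x (by simp [hx])) hbs

-- A minimum of B that beats no element of A is never removed — and never matters.
lemma Pgreedy_append_skip (as : List Int) : ∀ (bs : List Int) (b : Int),
    (∀ x ∈ as, b ≤ x) → Pgreedy as (bs ++ [b]) = Pgreedy as bs := by
  induction as with
  | nil => intro bs b _; rfl
  | cons a as' ih =>
    intro bs b hle
    have hba : ¬ b > a := not_lt.mpr (hle a (by simp))
    cases bs with
    | nil =>
      simp only [List.nil_append, Pgreedy, if_neg hba, Pgreedy_nil_right]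
      have := ih [] b (fun x hx => hle x (by simp [hx]))
      simpa [Pgreedy_nil_right] using this
    | cons c bs' =>
      by_cases hc : c > a
      · simp only [List.cons_append, Pgreedy, if_pos hc]
        rw [ih bs' b (fun x hx => hle x (by simp [hx]))]
      · simp only [List.cons_append, Pgreedy, if_neg hc]
        exact ih (c :: bs') b (fun x hx => hle x (by simp [hx]))

-- The two greedies agree: B's ascending scan = A's descending scan on the reversed lists.
lemma S_eq_P (bsAsc : List Int) : ∀ (asAsc : List Int),
    bsAsc.Pairwise (· ≤ ·) → asAsc.Pairwise (· ≤ ·) →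
    Sgreedy bsAsc asAsc = Pgreedy asAsc.reverse bsAsc.reverse := by
  induction bsAsc with
  | nil => intro asAsc _ _; simp [Sgreedy, Pgreedy_nil_right]
  | cons b bs' ih =>
    intro asAsc hbs has
    cases asAsc with
    | nil => simp [Sgreedy, Pgreedy]
    | cons a as' =>
      have hbs' := List.Pairwise.of_cons hbs
      have has' := List.Pairwise.of_cons has
      by_cases hba : b > a
      · simp only [Sgreedy, if_pos hba]
        rw [ih as' hbs' has']
        rw [List.reverse_cons, List.reverse_cons,
          Pgreedy_append_match a b as'.reverse bs'.reverse hba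
            (fun x hx => List.rel_of_pairwise_cons has (List.mem_reverse.mp hx))
            (fun y hy => List.rel_of_pairwise_cons hbs (List.mem_reverse.mp hy))]
      · simp only [Sgreedy, if_neg hba]
        rw [ih (a :: as') hbs' has]
        rw [List.reverse_cons (a := b),
          Pgreedy_append_skip (a :: as').reverse bs'.reverse b]
        intro x hx
        rcases List.mem_cons.mp (List.mem_reverse.mp hx) with rfl | h
        · exact not_lt.mp hba
        · exact le_trans (not_lt.mp hba) (List.rel_of_pairwise_cons has h)

-- B's pointer loop equals Sgreedy on the not-yet-consumed suffix of sorted A.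
lemma loopB_eq_S (bs : List Int) : ∀ (asc : List Int) (i : Int), 0 ≤ i →
    solutionAltLoop bs asc i = i + Sgreedy bs (asc.drop i.toNat) := by
  induction bs with
  | nil => intro asc i _; simp [solutionAltLoop, Sgreedy]
  | cons b rest ih =>
    intro asc i hi
    by_cases hlt : i < (asc.length : Int)
    · have hn : i.toNat < asc.length := by omega
      have hget : PySem.List.pyGet? asc i = some asc[i.toNat] := by
        have h1 : PySem.List.pyGet? asc i = asc[i.toNat]? := by
          conv_lhs => rw [show i = (i.toNat : Int) by omega]
          exact PySem.List.pyGet?_natCast asc i.toNat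
        rw [h1, List.getElem?_eq_getElem hn]
      have hdrop : asc.drop i.toNat = asc[i.toNat] :: asc.drop (i.toNat + 1) := by
        rw [List.drop_eq_getElem_cons hn]
      simp only [solutionAltLoop, if_pos hlt, hget]
      by_cases hba : b > asc[i.toNat]
      · simp only [if_pos hba]
        rw [ih asc (i + 1) (by omega), hdrop]
        simp only [Sgreedy, if_pos hba, show (i + 1).toNat = i.toNat + 1 by omega]
        ring
      · simp only [if_neg hba]
        rw [ih asc i hi, hdrop]
        simp [Sgreedy, if_neg hba]
    · have hdrop : asc.drop i.toNat = [] := by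
        apply List.drop_eq_nil_of_le; omega
      simp only [solutionAltLoop, if_neg hlt]
      rw [ih asc i hi, hdrop]
      simp [Sgreedy_nil_right]

-- sorted(xs, reverse=True) = reverse(sorted(xs)) for an identity key on Int
lemma sorted_rev_eq_reverse_sorted (xs : List Int) :
    PySem.List.sorted xs (fun x => x) true = (PySem.List.sorted xs (fun x => x) false).reverse := by
  apply PySem.List.eq_of_perm_of_pairwise_le_of_injective (key := fun x : Int => -x)
  · exact fun a b h => neg_injective h
  · exact (PySem.List.sorted_perm xs _ true).trans
      ((PySem.List.sorted_perm xs _ false).symm.trans (List.reverse_perm _).symm)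
  · exact (PySem.List.sorted_pairwise_rev xs (fun x => x)).imp (by intro a b h; omega)
  · exact (List.pairwise_reverse).mpr ((PySem.List.sorted_pairwise xs (fun x => x)).imp (by intro a b h; omega))

-- ===== VERDICT (by name: the statement is the Claim_ definition above) =====
theorem solution_spec : Claim_equal_solution := by
  intro A B _ hpre
  unfold Spec_solution solution solution_alt
  rw [loopA_eq_P _ _ 0
    (by rw [PySem.List.length_sorted, PySem.List.length_sorted]; exact hpre)]
  rw [loopB_eq_S _ _ 0 le_rfl]
  simp only [Int.toNat_zero, List.drop_zero]
  rw [S_eq_P _ _ (PySem.List.sorted_pairwise B (fun x => x))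
    (PySem.List.sorted_pairwise A (fun x => x))]
  rw [sorted_rev_eq_reverse_sorted A]
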